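-- pv_equiv track=rewrite | github.com/Secrettestbot/Super-board-game-game | games/sushi_go.py | _score_plate
-- ===== SOURCE A (Python) =====
-- def _score_plate(plate):
--     """Score a single player's plate (excluding maki and pudding)."""
--     score = 0
--
--     # Tempura: pairs worth 5
--     tempura = plate.count("Tempura")
--     score += (tempura // 2) * 5
--
--     # Sashimi: sets of 3 worth 10
--     sashimi = plate.count("Sashimi")
--     score += (sashimi // 3) * 10
--
--     # Dumpling: 1=1, 2=3, 3=6, 4=10, 5+=15
--     dumpling_scores = [0, 1, 3, 6, 10, 15]
--     dumplings = plate.count("Dumpling")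
--     if dumplings >= 5:
--         score += 15
--     else:
--         score += dumpling_scores[dumplings]
--
--     # Nigiri (with wasabi)
--     wasabi_pending = 0
--     for card in plate:
--         if card == "Wasabi":
--             wasabi_pending += 1
--         elif card in ("SalmonNigiri", "SquidNigiri", "EggNigiri"):
--             base = {"SalmonNigiri": 2, "SquidNigiri": 3, "EggNigiri": 1}[card]
--             if wasabi_pending > 0:
--                 score += base * 3
--                 wasabi_pending -= 1
--             else:
--                 score += base
--
--     # Party cards
--     # Tofu: 1=2pts, 2=6pts, 3+=0pts
--     tofu = plate.count("Tofu")
--     if tofu == 1: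
--         score += 2
--     elif tofu == 2:
--         score += 6
--     # 3+ = 0
--
--     # Eel: 1=-3pts, 2+=7pts
--     eel = plate.count("Eel")
--     if eel == 1:
--         score -= 3
--     elif eel >= 2:
--         score += 7
--
--     # Edamame: 1pt per opponent who has edamame (in 2p, max 1)
--     # Handled externally since it depends on opponent's plate
--
--     return score
-- ===== SOURCE B (Python) =====
-- def _score_plate(plate):
--     """Score a single player's plate (excluding maki and pudding)."""
--     NIGIRI = {"SalmonNigiri": 2, "SquidNigiri": 3, "EggNigiri": 1}
--     # one tally dict instead of repeated count scans
--     counts = {}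
--     for card in plate:
--         counts[card] = counts.get(card, 0) + 1
--     # nigiri/wasabi: two-pointer matching over position lists instead of a stateful multiplier pass
--     wasabi_pos = [i for i, c in enumerate(plate) if c == "Wasabi"]
--     nigiri = [(i, NIGIRI[c]) for i, c in enumerate(plate) if c in NIGIRI]
--     score = sum(b for _, b in nigiri)
--     w = 0
--     for i, b in nigiri:
--         if w < len(wasabi_pos) and wasabi_pos[w] < i:
--             score += 2 * b
--             w += 1
--     score += 5 * (counts.get("Tempura", 0) // 2)
--     score += 10 * (counts.get("Sashimi", 0) // 3)
--     d = counts.get("Dumpling", 0)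
--     score += 15 if d >= 5 else (0, 1, 3, 6, 10, 15)[d]
--     t = counts.get("Tofu", 0)
--     score += 2 if t == 1 else 6 if t == 2 else 0
--     e = counts.get("Eel", 0)
--     score += -3 if e == 1 else 7 if e >= 2 else 0
--     return score
-- ===== Notes on version B (the rewrite author's own statement) =====
-- stated objective: alternative
-- what changed: Replaces A's five count() scans and stateful wasabi-multiplier pass with one tally dict built once plus a two-pointer greedy match between the sorted wasabi-position and nigiri-position lists.
import Mathlib
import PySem

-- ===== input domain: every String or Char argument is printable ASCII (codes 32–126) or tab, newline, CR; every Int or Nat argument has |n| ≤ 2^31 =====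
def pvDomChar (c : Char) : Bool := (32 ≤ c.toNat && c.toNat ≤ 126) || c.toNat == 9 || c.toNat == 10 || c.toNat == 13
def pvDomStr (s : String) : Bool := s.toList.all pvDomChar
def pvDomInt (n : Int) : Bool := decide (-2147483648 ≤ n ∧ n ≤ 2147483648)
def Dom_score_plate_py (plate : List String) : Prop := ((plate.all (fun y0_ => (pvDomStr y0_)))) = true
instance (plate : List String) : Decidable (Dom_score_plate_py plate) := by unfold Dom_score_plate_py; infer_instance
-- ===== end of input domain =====

-- B replaces A's count() scans and stateful wasabi pass with a tally dict plus two-pointer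
-- matching on position lists (objective: alternative).

-- ===== PORT A =====
-- body of A's `for card in plate` nigiri loop; state = (score, wasabi_pending)
def aNigiriStep (sw : Int × Int) (card : String) : Int × Int :=
  if card == "Wasabi" then (sw.1, sw.2 + 1)
  else if card == "SalmonNigiri" || card == "SquidNigiri" || card == "EggNigiri" then
    -- dict-literal lookup; KeyError impossible: guarded by the membership test
    let base := (PySem.Dict.ofList [("SalmonNigiri", (2 : Int)), ("SquidNigiri", 3), ("EggNigiri", 1)]).getD card 0
    if sw.2 > 0 then (sw.1 + base * 3, sw.2 - 1) else (sw.1 + base, sw.2)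
  else sw

def score_plate_py (plate : List String) : Int :=
  let score : Int := 0
  let tempura : Int := PySem.List.count plate "Tempura"
  let score := score + PySem.Int.floordiv tempura 2 * 5
  let sashimi : Int := PySem.List.count plate "Sashimi"
  let score := score + PySem.Int.floordiv sashimi 3 * 10
  let dumpling_scores : List Int := [0, 1, 3, 6, 10, 15]
  let dumplings : Int := PySem.List.count plate "Dumpling"
  let score := if dumplings ≥ 5 then score + 15
               -- indexing in range: 0 ≤ dumplings < 5 here, so IndexError is impossible
               else score + PySem.List.pyGetD dumpling_scores dumplings 0
  let sw := plate.foldl aNigiriStep (score, 0)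
  let score := sw.1
  let tofu : Int := PySem.List.count plate "Tofu"
  let score := if tofu == 1 then score + 2 else if tofu == 2 then score + 6 else score
  let eel : Int := PySem.List.count plate "Eel"
  let score := if eel == 1 then score - 3 else if eel ≥ 2 then score + 7 else score
  score

-- ===== PORT B =====
-- B's NIGIRI base-value dict
def nigiriBase : PySem.Dict String Int :=
  PySem.Dict.ofList [("SalmonNigiri", 2), ("SquidNigiri", 3), ("EggNigiri", 1)]

def score_plate_py_alt (plate : List String) : Int :=
  -- counts[card] = counts.get(card, 0) + 1
  let counts := plate.foldl (fun d c => d.insert c (d.getD c 0 + 1)) PySem.Dict.empty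
  -- [i for i, c in enumerate(plate) if c == "Wasabi"]
  let wasabi_pos : List Int :=
    ((PySem.List.enumerate plate 0).filter (fun p => p.2 == "Wasabi")).map (·.1)
  -- [(i, NIGIRI[c]) for i, c in enumerate(plate) if c in NIGIRI]
  let nigiri : List (Int × Int) :=
    ((PySem.List.enumerate plate 0).filter (fun p => nigiriBase.contains p.2)).map
      (fun p => (p.1, nigiriBase.getD p.2 0))
  let score : Int := (nigiri.map (·.2)).sum
  -- two-pointer matching loop; state = (score, w)
  let sw := nigiri.foldl
    (fun sw p =>
      if sw.2 < (wasabi_pos.length : Int) ∧ PySem.List.pyGetD wasabi_pos sw.2 0 < p.1 then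
        (sw.1 + 2 * p.2, sw.2 + 1)
      else sw)
    (score, 0)
  let score := sw.1
  let score := score + 5 * PySem.Int.floordiv (counts.getD "Tempura" 0) 2
  let score := score + 10 * PySem.Int.floordiv (counts.getD "Sashimi" 0) 3
  let d := counts.getD "Dumpling" 0
  let score := score + (if d ≥ 5 then 15 else PySem.List.pyGetD [0, 1, 3, 6, 10, 15] d 0)
  let t := counts.getD "Tofu" 0
  let score := score + (if t == 1 then (2 : Int) else if t == 2 then 6 else 0)
  let e := counts.getD "Eel" 0
  let score := score + (if e == 1 then (-3 : Int) else if e ≥ 2 then 7 else 0)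
  score

-- ===== PRECONDITION & SPEC =====
def Spec_score_plate_py (plate : List String) (out : Int) : Prop := out = score_plate_py_alt plate
instance (plate : List String) (out : Int) : Decidable (Spec_score_plate_py plate out) := by unfold Spec_score_plate_py; infer_instance

-- ===== CLAIM (what is proved, stated in full; the proofs are below) =====
def Claim_equal_score_plate_py : Prop := ∀ (plate : List String), Dom_score_plate_py plate → Spec_score_plate_py plate (score_plate_py plate)

-- ===== LEMMAS AND PROOFS =====

-- two-pointer matching, recursion form: consume head wasabi position when it precedes the nigiri
def matchRec : List (Int × Int) → List Int → Int
  | [], _ => 0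
  | (_, _) :: rest, [] => matchRec rest []
  | (i, b) :: rest, q :: ws => if q < i then 2 * b + matchRec rest ws else matchRec rest (q :: ws)

theorem matchRec_nil (ns : List (Int × Int)) : matchRec ns [] = 0 := by
  induction ns with
  | nil => rfl
  | cons p rest ih => rcases p with ⟨i, b⟩; simpa [matchRec] using ih

-- proof-side abbreviations for B's two position lists (start index k)
def wp (xs : List String) (k : Int) : List Int :=
  ((PySem.List.enumerate xs k).filter (fun p => p.2 == "Wasabi")).map (·.1)

def nl (xs : List String) (k : Int) : List (Int × Int) :=
  ((PySem.List.enumerate xs k).filter (fun p => nigiriBase.contains p.2)).map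
    (fun p => (p.1, nigiriBase.getD p.2 0))

theorem contains_nigiriBase_eq_false (c : String)
    (h1 : c ≠ "SalmonNigiri") (h2 : c ≠ "SquidNigiri") (h3 : c ≠ "EggNigiri") :
    nigiriBase.contains c = false := by
  have hmk : nigiriBase
      = PySem.Dict.mk [("SalmonNigiri", 2), ("SquidNigiri", 3), ("EggNigiri", 1)] := by decide
  rw [hmk]
  simp only [PySem.Dict.contains_mk, List.any_cons, List.any_nil, Bool.or_false,
    Bool.or_eq_false_iff, beq_eq_false_iff_ne]
  exact ⟨fun h => h1 h.symm, fun h => h2 h.symm, fun h => h3 h.symm⟩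

theorem wp_lower (xs : List String) (k : Int) : ∀ q ∈ wp xs k, k ≤ q := by
  intro q hq
  simp only [wp, List.mem_map, List.mem_filter] at hq
  obtain ⟨p, ⟨hp, -⟩, rfl⟩ := hq
  rw [PySem.List.mem_enumerate_iff] at hp
  obtain ⟨j, hj, rfl⟩ := hp
  simp only []
  omega

-- B's pointer loop computes matchRec on the not-yet-consumed suffix of the wasabi positions
theorem pointer_loop_eq (W : List Int) (ns : List (Int × Int)) :
    ∀ (w : Nat), w ≤ W.length → ∀ (s : Int),
    (ns.foldl
      (fun sw p =>
        if sw.2 < (W.length : Int) ∧ PySem.List.pyGetD W sw.2 0 < p.1 then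
          (sw.1 + 2 * p.2, sw.2 + 1)
        else sw)
      (s, (w : Int))).1 = s + matchRec ns (W.drop w) := by
  induction ns with
  | nil => intro w hw s; simp [matchRec]
  | cons p rest ih =>
    intro w hw s
    rcases p with ⟨i, b⟩
    by_cases hlt : w < W.length
    · have hdrop : W.drop w = W[w] :: W.drop (w + 1) := List.drop_eq_getElem_cons hlt
      have hget : PySem.List.pyGetD W (w : Int) 0 = W[w] := by
        rw [PySem.List.pyGetD_natCast]
        exact List.getD_eq_getElem W 0 hlt
      by_cases hc : W[w] < i
      · have hcond : ((w : Int) < (W.length : Int) ∧ PySem.List.pyGetD W (w : Int) 0 < i) := by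
          constructor
          · exact_mod_cast hlt
          · rw [hget]; exact hc
        simp only [List.foldl_cons, if_pos hcond]
        have : ((w : Int) + 1) = ((w + 1 : Nat) : Int) := by push_cast; ring
        rw [this, ih (w + 1) hlt (s + 2 * b), hdrop]
        simp only [matchRec, if_pos hc]
        ring
      · have hcond : ¬((w : Int) < (W.length : Int) ∧ PySem.List.pyGetD W (w : Int) 0 < i) := by
          rintro ⟨-, h2⟩; rw [hget] at h2; exact hc h2
        simp only [List.foldl_cons, if_neg hcond]
        rw [ih w hw s, hdrop]
        simp only [matchRec, if_neg hc]
    · have hw' : w = W.length := le_antisymm hw (le_of_not_gt hlt)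
      have hcond : ¬((w : Int) < (W.length : Int) ∧ PySem.List.pyGetD W (w : Int) 0 < i) := by
        rintro ⟨h1, -⟩; subst hw'; exact absurd h1 (by exact_mod_cast lt_irrefl _)
      simp only [List.foldl_cons, if_neg hcond]
      rw [ih w hw s]
      subst hw'
      simp [List.drop_length, matchRec_nil]

-- A's stateful nigiri fold = base sum + two-pointer matching bonus (pending wasabi = `pre`)
theorem aFold_eq_match (xs : List String) :
    ∀ (k : Int) (pre : List Int) (s : Int), (∀ q ∈ pre, q < k) →
    (xs.foldl aNigiriStep (s, (pre.length : Int))).1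
      = s + ((nl xs k).map (·.2)).sum + matchRec (nl xs k) (pre ++ wp xs k) := by
  induction xs with
  | nil => intro k pre s _; simp [nl, wp, PySem.List.enumerate_nil, matchRec]
  | cons card rest ih =>
    intro k pre s hpre
    have henum : PySem.List.enumerate (card :: rest) k = (k, card) :: PySem.List.enumerate rest (k + 1) :=
      PySem.List.enumerate_cons card rest k
    by_cases h1 : card = "Wasabi"
    · subst h1
      have hwp : wp ("Wasabi" :: rest) k = k :: wp rest (k + 1) := by
        simp [wp, henum]
      have hnl : nl ("Wasabi" :: rest) k = nl rest (k + 1) := by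
        simp [nl, henum, contains_nigiriBase_eq_false "Wasabi" (by decide) (by decide) (by decide)]
      have hstep : aNigiriStep (s, (pre.length : Int)) "Wasabi" = (s, (pre.length : Int) + 1) := rfl
      have hlen : ((pre.length : Int) + 1) = (((pre ++ [k]).length : Nat) : Int) := by
        simp only [List.length_append, List.length_cons, List.length_nil]
        push_cast
        ring
      rw [List.foldl_cons, hstep, hlen,
        ih (k + 1) (pre ++ [k]) s (by
          intro q hq
          rcases List.mem_append.1 hq with h | h
          · exact lt_trans (hpre q h) (by omega)
          · simp at h; omega)]
      rw [hnl, hwp]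
      simp only [List.append_assoc, List.singleton_append]
    · rcases em (card = "SalmonNigiri" ∨ card = "SquidNigiri" ∨ card = "EggNigiri") with hn | hn
      · -- nigiri card with base b
        obtain ⟨b, hcont, hgetD, habase⟩ :
            ∃ b : Int, nigiriBase.contains card = true ∧ nigiriBase.getD card 0 = b ∧
              (PySem.Dict.ofList [("SalmonNigiri", (2 : Int)), ("SquidNigiri", 3), ("EggNigiri", 1)]).getD card 0 = b := by
          rcases hn with rfl | rfl | rfl
          · exact ⟨2, by decide, by decide, by decide⟩
          · exact ⟨3, by decide, by decide, by decide⟩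
          · exact ⟨1, by decide, by decide, by decide⟩
        have hnw : card ≠ "Wasabi" := h1
        have hnl : nl (card :: rest) k = (k, b) :: nl rest (k + 1) := by
          simp [nl, henum, hcont, hgetD]
        have hwp : wp (card :: rest) k = wp rest (k + 1) := by
          have : (card == "Wasabi") = false := by simpa using hnw
          simp [wp, henum, this]
        have hbool : (card == "SalmonNigiri" || card == "SquidNigiri" || card == "EggNigiri") = true := by
          rcases hn with rfl | rfl | rfl <;> decide
        rcases pre with _ | ⟨q, pre'⟩
        · -- no pending wasabi: every remaining wasabi position is ≥ k + 1 > k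
          have hstep : aNigiriStep (s, ((0 : Nat) : Int)) card = (s + b, 0) := by
            simp [aNigiriStep, hnw, hbool, habase]
          rw [List.foldl_cons]
          simp only [List.length_nil] at hstep ⊢
          rw [hstep, show (0 : Int) = (([] : List Int).length : Int) from rfl,
            ih (k + 1) [] (s + b) (by intro q hq; simp at hq)]
          rw [hnl, hwp]
          have hmatch : matchRec ((k, b) :: nl rest (k + 1)) ([] ++ wp rest (k + 1))
              = matchRec (nl rest (k + 1)) ([] ++ wp rest (k + 1)) := by
            rcases hW : wp rest (k + 1) with _ | ⟨q, ws⟩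
            · simp [matchRec]
            · have hq : k + 1 ≤ q := wp_lower rest (k + 1) q (by rw [hW]; simp)
              simp [matchRec, show ¬(q < k) by omega]
          rw [List.nil_append] at hmatch ⊢
          rw [hmatch]
          simp only [List.map_cons, List.sum_cons]
          ring
        · -- pending wasabi: A triples, B consumes the head position (which is < k)
          have hqk : q < k := hpre q (by simp)
          have hstep : aNigiriStep (s, (((q :: pre').length : Nat) : Int)) card
              = (s + b * 3, (((q :: pre').length : Nat) : Int) - 1) := by
            simp [aNigiriStep, hnw, hbool, habase]
          have hlen : (((q :: pre').length : Nat) : Int) - 1 = ((pre'.length : Nat) : Int) := by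
            simp only [List.length_cons]
            push_cast
            ring
          rw [List.foldl_cons, hstep, hlen,
            ih (k + 1) pre' (s + b * 3) (by
              intro r hr; exact lt_trans (hpre r (by simp [hr])) (by omega))]
          rw [hnl, hwp]
          simp only [List.cons_append, matchRec, if_pos hqk]
          simp; ring
      · -- inert card: both sides skip it
        rw [not_or, not_or] at hn
        obtain ⟨h2, h3, h4⟩ := hn
        have hnl : nl (card :: rest) k = nl rest (k + 1) := by
          simp [nl, henum, contains_nigiriBase_eq_false card h2 h3 h4]
        have hwp : wp (card :: rest) k = wp rest (k + 1) := by
          have : (card == "Wasabi") = false := by simpa using h1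
          simp [wp, henum, this]
        have hstep : aNigiriStep (s, (pre.length : Int)) card = (s, (pre.length : Int)) := by
          simp [aNigiriStep, h1, h2, h3, h4]
        rw [List.foldl_cons, hstep,
          ih (k + 1) pre s (fun q hq => lt_trans (hpre q hq) (by omega)), hnl, hwp]

-- counts.getD c 0 = plate.count c
theorem counts_getD (plate : List String) (c : String) :
    (plate.foldl (fun d x => d.insert x (d.getD x 0 + 1)) PySem.Dict.empty).getD c 0
      = (plate.count c : Int) := by
  rw [PySem.Dict.getD_foldl_insert_add_one]
  simp [PySem.Dict.getD_empty]

-- pointer_loop_eq specialised to w = 0 (the loop as B runs it)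
theorem pointer_loop_eq_zero (W : List Int) (ns : List (Int × Int)) (s : Int) :
    (ns.foldl
      (fun sw p =>
        if sw.2 < (W.length : Int) ∧ PySem.List.pyGetD W sw.2 0 < p.1 then
          (sw.1 + 2 * p.2, sw.2 + 1)
        else sw)
      (s, 0)).1 = s + matchRec ns W := by
  have h := pointer_loop_eq W ns 0 (Nat.zero_le _) s
  simpa using h

-- aFold_eq_match specialised to the empty pending list (the fold as A runs it)
theorem aFold_zero (xs : List String) (s : Int) :
    (xs.foldl aNigiriStep (s, 0)).1
      = s + ((nl xs 0).map (·.2)).sum + matchRec (nl xs 0) (wp xs 0) := by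
  have h := aFold_eq_match xs 0 [] s (by intro q hq; simp at hq)
  simpa using h

-- ===== VERDICT (by name: the statement is the Claim_ definition above) =====
theorem score_plate_py_spec : Claim_equal_score_plate_py := by
  intro plate _
  unfold Spec_score_plate_py score_plate_py score_plate_py_alt
  simp only [counts_getD, PySem.List.count_eq]
  rw [pointer_loop_eq_zero, aFold_zero]
  simp only [nl, wp]
  split_ifs <;> ring
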